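-- pv_equiv track=rewrite | github.com/jonathantsang/CompetitiveProgramming | leetcode/contest/2019/may18/1048.py | predecessor
-- ===== SOURCE A (Python) =====
-- def predecessor(word1, word2):
--     if len(word1) + 1 != len(word2):
--         return False
--
--     # Edge case
--     if len(word1) == 1 and len(word2) == 2:
--         return (word1 == word2[0] or word1 == word2[1])
--
--     onechar = False
--     for i in range(0, len(word1)):
--         if onechar:
--             if word1[i] != word2[i+1]:
--                 return False
--             # Else same fine
--         else:
--             if word1[i] != word2[i]:
--                 onechar = True
--                 # Check one char ahead, for this one
--                 if word1[i] != word2[i+1]: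
--                     return False
--             # Else same fine
--     return True
-- ===== SOURCE B (Python) =====
-- def predecessor(word1, word2):
--     if len(word1) + 1 != len(word2):
--         return False
--     for i in range(len(word1)):
--         if word1[i] != word2[i]:
--             return word1[i:] == word2[i+1:]
--     return True
-- ===== Notes on version B (the rewrite author's own statement) =====
-- stated objective: simpler
-- what changed: Replaces A's flag-carrying scan (onechar state plus a length-1 special case) with a single scan to the first mismatch followed by one whole-suffix slice comparison; the special case and the stateful continuation disappear.
import Mathlib
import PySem

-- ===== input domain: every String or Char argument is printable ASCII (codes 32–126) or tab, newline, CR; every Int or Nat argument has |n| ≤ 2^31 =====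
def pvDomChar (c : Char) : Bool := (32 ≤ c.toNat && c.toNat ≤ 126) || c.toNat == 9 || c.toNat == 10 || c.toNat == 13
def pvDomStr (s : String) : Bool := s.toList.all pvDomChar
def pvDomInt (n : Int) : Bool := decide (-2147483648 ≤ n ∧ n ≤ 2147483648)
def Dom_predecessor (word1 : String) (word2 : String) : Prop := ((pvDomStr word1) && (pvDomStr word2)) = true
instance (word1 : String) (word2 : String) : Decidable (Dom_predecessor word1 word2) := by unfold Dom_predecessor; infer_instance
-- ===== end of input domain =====

-- B replaces A's flag-carrying scan (onechar state + length-1 special case) with a scan to the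
-- first mismatch followed by one whole-suffix comparison; objective: simpler.

-- ===== PORT A =====
-- A's loop in onechar mode: compares word1[i] with word2[i+1]; here the second list is
-- already the shifted suffix of word2.
def predAOn : List Char → List Char → Bool
  | [], _ => true
  | a :: l1, b :: l2 => if a ≠ b then false else predAOn l1 l2
  | _ :: _, [] => true   -- unreachable under the length guard

-- A's loop before a mismatch (onechar = False); on the first mismatch it checks word2[i+1]
-- and switches to the shifted comparison (onechar = True).
def predAOff : List Char → List Char → Bool
  | [], _ => true
  | a :: l1, b :: l2 =>
      if a ≠ b then
        match l2 with
        | [] => true           -- unreachable under the length guard (word2[i+1] exists)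
        | c :: l2' => if a ≠ c then false else predAOn l1 l2'
      else predAOff l1 l2
  | _ :: _, [] => true   -- unreachable under the length guard

def predecessor (word1 : String) (word2 : String) : Bool :=
  let l1 := word1.toList
  let l2 := word2.toList
  if l1.length + 1 ≠ l2.length then false
  else if l1.length = 1 ∧ l2.length = 2 then
    -- word1 == word2[0] or word1 == word2[1] (word1 has length 1)
    decide (l1.getD 0 ' ' = l2.getD 0 ' ') || decide (l1.getD 0 ' ' = l2.getD 1 ' ')
  else predAOff l1 l2

-- ===== PORT B =====
-- scan to the first mismatch; there, compare the whole remaining suffixes (word1[i:] vs word2[i+1:]).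
def predBLoop : List Char → List Char → Bool
  | [], _ => true
  | a :: l1, b :: l2 => if a ≠ b then decide (a :: l1 = l2) else predBLoop l1 l2
  | _ :: _, [] => true   -- unreachable under the length guard

def predecessor_alt (word1 : String) (word2 : String) : Bool :=
  let l1 := word1.toList
  let l2 := word2.toList
  if l1.length + 1 = l2.length then predBLoop l1 l2 else false

-- ===== PRECONDITION & SPEC =====
def Spec_predecessor (word1 : String) (word2 : String) (out : Bool) : Prop := out = predecessor_alt word1 word2
instance (word1 : String) (word2 : String) (out : Bool) : Decidable (Spec_predecessor word1 word2 out) := by unfold Spec_predecessor; infer_instance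

-- ===== CLAIM (what is proved, stated in full; the proofs are below) =====
def Claim_equal_predecessor : Prop := ∀ (word1 : String) (word2 : String), Dom_predecessor word1 word2 → Spec_predecessor word1 word2 (predecessor word1 word2)

-- ===== LEMMAS AND PROOFS =====

-- elementwise comparison of equally long lists is list equality
theorem predAOn_eq_decide : ∀ (l1 l2 : List Char), l1.length = l2.length →
    predAOn l1 l2 = decide (l1 = l2) := by
  intro l1
  induction l1 with
  | nil => intro l2 h; cases l2 <;> simp_all [predAOn]
  | cons a t ih =>
    intro l2 h
    cases l2 with
    | nil => simp at h
    | cons b l2' =>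
      simp only [predAOn]
      by_cases hab : a = b
      · subst hab
        simp [ih l2' (by simpa using h)]
      · simp [hab]

theorem predAOff_eq_predBLoop : ∀ (l1 l2 : List Char), l2.length = l1.length + 1 →
    predAOff l1 l2 = predBLoop l1 l2 := by
  intro l1
  induction l1 with
  | nil => intro l2 h; cases l2 <;> simp_all [predAOff, predBLoop]
  | cons a t ih =>
    intro l2 h
    cases l2 with
    | nil => simp at h
    | cons b l2' =>
      have hlen : l2'.length = t.length + 1 := by simpa using h
      simp only [predAOff, predBLoop]
      by_cases hab : a = b
      · subst hab; simp [ih l2' hlen]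
      · cases l2' with
        | nil => simp at hlen
        | cons c l2'' =>
          have hlen' : t.length = l2''.length := by simp at hlen; omega
          simp only [ite_not]
          by_cases hac : a = c
          · subst hac
            simp [hab, predAOn_eq_decide t l2'' hlen']
          · simp [hab, hac]

theorem pred_eq (word1 word2 : String) : predecessor word1 word2 = predecessor_alt word1 word2 := by
  unfold predecessor predecessor_alt
  set l1 := word1.toList with hl1
  set l2 := word2.toList with hl2
  by_cases hlen : l1.length + 1 = l2.length
  · rw [if_neg (show ¬ l1.length + 1 ≠ l2.length by omega), if_pos hlen]
    by_cases hedge : l1.length = 1 ∧ l2.length = 2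
    · -- the special case: l1 = [a], l2 = [b, c]
      obtain ⟨h1, h2⟩ := hedge
      match l1, h1, l2, h2 with
      | [a], _, [b, c], _ =>
        simp only [predBLoop]
        by_cases hab : a = b
        · subst hab; simp
        · simp [hab]
    · rw [if_neg hedge]
      exact predAOff_eq_predBLoop l1 l2 hlen.symm
  · simp [hlen]

-- ===== VERDICT (by name: the statement is the Claim_ definition above) =====
theorem predecessor_spec : Claim_equal_predecessor := by
  intro word1 word2 _
  exact pred_eq word1 word2
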